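-- pv_equiv track=rewrite | github.com/bladeacer/gen-data | generate_data.py | find_new_ids
-- ===== SOURCE A (Python) =====
-- def find_new_ids(num_records: int, combined_existing_ids: set) -> list:
--     """Finds available IDs based on the combined set, prioritizing gaps."""
--
--     if not combined_existing_ids:
--         return list(range(1, num_records + 1))
--
--     max_id = max(combined_existing_ids)
--
--     gap_ids = [i for i in range(1, max_id) if i not in combined_existing_ids]
--     new_ids = gap_ids[:num_records]
--
--     if len(new_ids) < num_records:
--         start_sequential = max_id + 1
--         num_sequential = num_records - len(new_ids)
--         new_ids.extend(range(start_sequential, start_sequential + num_sequential))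
--
--     new_ids.sort()
--     return new_ids
-- ===== SOURCE B (Python) =====
-- def find_new_ids(num_records: int, combined_existing_ids: set) -> list:
--     """Finds available IDs based on the combined set, prioritizing gaps."""
--     result = []
--     candidate = 1
--     while len(result) < num_records:
--         if candidate not in combined_existing_ids:
--             result.append(candidate)
--         candidate += 1
--     return result
-- ===== Notes on version B (the rewrite author's own statement) =====
-- stated objective: simpler
-- what changed: Replaces A's four-phase construction (max, full gap comprehension over range(1,max), slice, sequential tail extension, final sort) with a single upward scan from candidate 1 that appends every id not in the set and stops as soon as num_records ids are collected; the result is ascending by construction, so no max(), no slice, no second phase, no sort, and no scan past the last id needed.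
-- intended difference: On a nonempty id set whose ids are all negative (with num_records > 0), A returns num_records consecutive ids starting at max_id+1 (non-positive or colliding with the natural ids 1..), while B returns [1..num_records], the intended positive available ids. — e.g. on find_new_ids(1, [-3]): A returns [-2], B returns [1]
-- outside the precondition, e.g. on find_new_ids(-1, {3}): A returns [1], B returns []
import Mathlib
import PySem

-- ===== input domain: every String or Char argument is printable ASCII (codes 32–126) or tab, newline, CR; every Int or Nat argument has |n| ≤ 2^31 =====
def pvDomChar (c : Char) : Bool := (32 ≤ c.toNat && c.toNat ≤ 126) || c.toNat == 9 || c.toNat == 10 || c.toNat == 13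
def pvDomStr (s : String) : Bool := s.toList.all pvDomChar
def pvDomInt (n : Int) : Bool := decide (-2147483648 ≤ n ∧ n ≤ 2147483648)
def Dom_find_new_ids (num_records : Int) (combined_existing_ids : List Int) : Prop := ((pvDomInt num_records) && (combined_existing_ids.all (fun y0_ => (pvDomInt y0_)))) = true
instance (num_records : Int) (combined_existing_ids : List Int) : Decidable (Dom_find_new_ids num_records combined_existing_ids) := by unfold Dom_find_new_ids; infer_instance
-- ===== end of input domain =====

-- B replaces A's four phases (max, gap comprehension, slice, sequential extension, sort)
-- by one upward scan collecting ids absent from the set; simpler, same cost, no sort.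

-- ===== PORT A =====
def find_new_ids (num_records : Int) (combined_existing_ids : List Int) : List Int :=
  if combined_existing_ids = [] then
    PySem.List.pyRange 1 (num_records + 1) 1
  else
    match PySem.List.max? combined_existing_ids (fun x => x) with
    | none => []   -- unreachable: the list is nonempty
    | some max_id =>
      let gap_ids := (PySem.List.pyRange 1 max_id 1).filter (fun i => !(decide (i ∈ combined_existing_ids)))
      let new_ids := PySem.List.slice gap_ids none (some num_records)
      let new_ids :=
        if (new_ids.length : Int) < num_records then
          new_ids ++ PySem.List.pyRange (max_id + 1) (max_id + 1 + (num_records - (new_ids.length : Int))) 1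
        else new_ids
      PySem.List.sorted new_ids (fun x => x) false

-- ===== PORT B =====
-- the while-loop of Source B: `need` = num_records - len(result) (loop guard), scanning `candidate` upward
def findNewIdsLoop (need : Nat) (candidate : Int) (s : List Int) : List Int :=
  if h0 : need = 0 then []
  else if hmem : candidate ∈ s then
    findNewIdsLoop need (candidate + 1) s
  else
    candidate :: findNewIdsLoop (need - 1) (candidate + 1) s
termination_by (need, (s.filter (fun x => decide (candidate ≤ x))).length)
decreasing_by
  · apply Prod.Lex.right
    have h1 : s.filter (fun x => decide (candidate + 1 ≤ x))
        = (s.filter (fun x => decide (candidate ≤ x))).filter (fun x => decide (candidate + 1 ≤ x)) := by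
      rw [List.filter_filter]
      apply List.filter_congr
      intro x _
      by_cases h : candidate + 1 ≤ x <;> simp [h] <;> omega
    rw [h1]
    apply List.length_filter_lt_length_iff_exists.mpr
    exact ⟨candidate, by simp [List.mem_filter, hmem], by simp⟩
  · exact Prod.Lex.left _ _ (by omega)

def find_new_ids_alt (num_records : Int) (combined_existing_ids : List Int) : List Int :=
  findNewIdsLoop num_records.toNat 1 combined_existing_ids

-- ===== PRECONDITION & SPEC =====
-- Pre_ excludes negative num_records: a record count is naturally non-negative; there A's
-- slice gap_ids[:num_records] accidentally drops elements from the end while B returns [].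
def Pre_find_new_ids (num_records : Int) (combined_existing_ids : List Int) : Prop :=
  0 ≤ num_records
instance (num_records : Int) (combined_existing_ids : List Int) : Decidable (Pre_find_new_ids num_records combined_existing_ids) := by unfold Pre_find_new_ids; infer_instance

def pvWitness_find_new_ids : Int × List Int := (3, [1, 2, 7])

-- On a nonempty id set whose ids are all negative (with num_records > 0), A returns
-- num_records consecutive ids starting at max_id+1 (non-positive or colliding with the
-- natural ids 1..), while B returns [1..num_records], the intended positive available ids.
def D_find_new_ids (num_records : Int) (combined_existing_ids : List Int) : Prop :=
  0 < num_records ∧ combined_existing_ids ≠ [] ∧ ∀ x ∈ combined_existing_ids, x < 0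
instance (num_records : Int) (combined_existing_ids : List Int) : Decidable (D_find_new_ids num_records combined_existing_ids) := by unfold D_find_new_ids; infer_instance

def Spec_find_new_ids (num_records : Int) (combined_existing_ids : List Int) (out : List Int) : Prop := ¬ D_find_new_ids num_records combined_existing_ids → out = find_new_ids_alt num_records combined_existing_ids
instance (num_records : Int) (combined_existing_ids : List Int) (out : List Int) : Decidable (Spec_find_new_ids num_records combined_existing_ids out) := by unfold Spec_find_new_ids; infer_instance

def pvDiffWitness_find_new_ids : Int × List Int := (1, [-3])
def pvDiffWitnessOut_find_new_ids : (List Int) × (List Int) := ([-2], [1])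

-- ===== CLAIM (what is proved, stated in full; the proofs are below) =====
def Claim_unchanged_find_new_ids : Prop := ∀ (num_records : Int) (combined_existing_ids : List Int), Dom_find_new_ids num_records combined_existing_ids → Pre_find_new_ids num_records combined_existing_ids → Spec_find_new_ids num_records combined_existing_ids (find_new_ids num_records combined_existing_ids)
def Claim_changed_find_new_ids : Prop := Dom_find_new_ids (pvDiffWitness_find_new_ids.1) (pvDiffWitness_find_new_ids.2) ∧ Pre_find_new_ids (pvDiffWitness_find_new_ids.1) (pvDiffWitness_find_new_ids.2) ∧ D_find_new_ids (pvDiffWitness_find_new_ids.1) (pvDiffWitness_find_new_ids.2) ∧ find_new_ids (pvDiffWitness_find_new_ids.1) (pvDiffWitness_find_new_ids.2) = pvDiffWitnessOut_find_new_ids.1 ∧ find_new_ids_alt (pvDiffWitness_find_new_ids.1) (pvDiffWitness_find_new_ids.2) = pvDiffWitnessOut_find_new_ids.2 ∧ pvDiffWitnessOut_find_new_ids.1 ≠ pvDiffWitnessOut_find_new_ids.2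
def Claim_exact_find_new_ids : Prop := ∀ (num_records : Int) (combined_existing_ids : List Int), Dom_find_new_ids num_records combined_existing_ids → Pre_find_new_ids num_records combined_existing_ids → D_find_new_ids num_records combined_existing_ids → find_new_ids num_records combined_existing_ids ≠ find_new_ids_alt num_records combined_existing_ids

-- ===== LEMMAS AND PROOFS =====

theorem findNewIdsLoop_all_lt (s : List Int) (need : Nat) (c : Int)
    (h : ∀ x ∈ s, x < c) :
    findNewIdsLoop need c s = PySem.List.pyRange c (c + need) 1 := by
  induction need generalizing c with
  | zero => rw [findNewIdsLoop, dif_pos rfl, PySem.List.pyRange_one_eq_nil (by simp)]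
  | succ n ih =>
    rw [findNewIdsLoop, dif_neg (Nat.succ_ne_zero n),
        dif_neg (fun hc => lt_irrefl c (h c hc))]
    simp only [Nat.add_sub_cancel]
    rw [ih (c + 1) (fun x hx => lt_trans (h x hx) (by omega))]
    conv_rhs => rw [PySem.List.pyRange_one_cons (show c < c + ((n + 1 : Nat) : Int) by push_cast; omega)]
    congr 2
    push_cast; ring

theorem findNewIdsLoop_split (s : List Int) (M : Int)
    (hub : ∀ x ∈ s, x ≤ M) (hM : M ∈ s) :
    ∀ (g : Nat) (c : Int) (need : Nat), c + g = M →
    findNewIdsLoop need c s =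
      (let gaps := (PySem.List.pyRange c M 1).filter (fun i => !(decide (i ∈ s)));
       if need ≤ gaps.length then gaps.take need
       else gaps ++ PySem.List.pyRange (M + 1) (M + 1 + ((need - gaps.length : Nat) : Int)) 1) := by
  intro g
  induction g with
  | zero =>
    intro c need hc
    have hcM : c = M := by omega
    subst hcM
    rw [PySem.List.pyRange_one_eq_nil (le_refl c)]
    simp only [List.filter_nil, List.length_nil, List.take_nil, List.nil_append, Nat.sub_zero]
    by_cases hneed : need = 0
    · subst hneed
      rw [findNewIdsLoop, dif_pos rfl, if_pos (Nat.zero_le _)]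
    · rw [if_neg (by omega)]
      rw [findNewIdsLoop, dif_neg hneed, dif_pos hM]
      rw [findNewIdsLoop_all_lt s need (c + 1) (fun x hx => by have := hub x hx; omega)]
  | succ g ih =>
    intro c need hc
    have hcM : c < M := by push_cast at hc; omega
    have hrange : PySem.List.pyRange c M 1 = c :: PySem.List.pyRange (c + 1) M 1 :=
      PySem.List.pyRange_one_cons hcM
    rw [hrange]
    by_cases hneed : need = 0
    · subst hneed
      rw [findNewIdsLoop, dif_pos rfl, if_pos (Nat.zero_le _), List.take_zero]
    · obtain ⟨k, rfl⟩ : ∃ k, need = k + 1 := ⟨need - 1, by omega⟩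
      by_cases hcs : c ∈ s
      · rw [findNewIdsLoop, dif_neg (Nat.succ_ne_zero k), dif_pos hcs]
        rw [ih (c + 1) (k + 1) (by omega)]
        simp only [List.filter_cons, hcs, decide_true, Bool.not_true]
        norm_num
      · rw [findNewIdsLoop, dif_neg (Nat.succ_ne_zero k), dif_neg hcs]
        simp only [Nat.add_sub_cancel]
        rw [ih (c + 1) k (by omega)]
        simp only [List.filter_cons, hcs, decide_false, Bool.not_false, if_true, List.length_cons]
        by_cases hk : k ≤ (List.filter (fun i => !decide (i ∈ s)) (PySem.List.pyRange (c + 1) M 1)).length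
        · rw [if_pos hk, if_pos (by omega), List.take_succ_cons]
        · rw [if_neg hk, if_neg (by omega), List.cons_append]
          have h2 : k + 1 - ((List.filter (fun i => !decide (i ∈ s)) (PySem.List.pyRange (c + 1) M 1)).length + 1)
              = k - (List.filter (fun i => !decide (i ∈ s)) (PySem.List.pyRange (c + 1) M 1)).length := by omega
          rw [h2]

theorem gaps_pairwise_lt (a b : Int) (p : Int → Bool) :
    ((PySem.List.pyRange a b 1).filter p).Pairwise (· < ·) :=
  List.Pairwise.sublist List.filter_sublist (PySem.List.pairwise_lt_pyRange_one a b)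

theorem main_eq (n : Int) (s : List Int) (hpre : 0 ≤ n)
    (hnd : ¬ (0 < n ∧ s ≠ [] ∧ ∀ x ∈ s, x < 0)) :
    find_new_ids n s = find_new_ids_alt n s := by
  unfold find_new_ids find_new_ids_alt
  by_cases hs : s = []
  · subst hs
    rw [if_pos rfl, findNewIdsLoop_all_lt [] n.toNat 1 (by simp)]
    congr 1
    omega
  · rw [if_neg hs]
    obtain ⟨m, hm⟩ : ∃ m, PySem.List.max? s (fun x => x) = some m := by
      cases h : PySem.List.max? s (fun x => x) with
      | none => exact absurd ((PySem.List.max?_eq_none_iff s _).mp h) hs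
      | some m => exact ⟨m, rfl⟩
    have hmem : m ∈ s := PySem.List.max?_mem hm
    have hub : ∀ y ∈ s, y ≤ m := PySem.List.max?_isMax hm
    rw [hm]
    simp only [PySem.List.slice_to _ hpre]
    by_cases hm1 : 1 ≤ m
    · rw [findNewIdsLoop_split s m hub hmem (m - 1).toNat 1 n.toNat (by omega)]
      simp only
      set gaps := (PySem.List.pyRange 1 m 1).filter (fun i => !(decide (i ∈ s))) with hg
      by_cases hle : n.toNat ≤ gaps.length
      · rw [if_pos hle]
        have hlen : ((gaps.take n.toNat).length : Int) = n := by
          rw [List.length_take]; omega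
        rw [if_neg (by omega)]
        exact PySem.List.sorted_eq_self_of_pairwise _ _
          ((List.Pairwise.sublist (List.take_sublist _ _) (gaps_pairwise_lt 1 m _)).imp le_of_lt)
      · rw [if_neg hle, List.take_of_length_le (by omega)]
        rw [if_pos (show (gaps.length : Int) < n by omega)]
        have harg : n - (gaps.length : Int) = ((n.toNat - gaps.length : Nat) : Int) := by omega
        rw [harg]
        apply PySem.List.sorted_eq_self_of_pairwise
        rw [List.pairwise_append]
        refine ⟨(gaps_pairwise_lt 1 m _).imp le_of_lt,
          (PySem.List.pairwise_lt_pyRange_one _ _).imp le_of_lt, ?_⟩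
        intro a ha b hb
        have ha' : a < m := by
          have := List.mem_filter.mp ha
          exact (PySem.List.mem_pyRange_one.mp this.1).2
        have hb' : m + 1 ≤ b := (PySem.List.mem_pyRange_one.mp hb).1
        omega
    · have hgap : PySem.List.pyRange 1 m 1 = [] := PySem.List.pyRange_one_eq_nil (by omega)
      rw [hgap]
      simp only [List.filter_nil, List.take_nil, List.length_nil, Nat.cast_zero]
      by_cases hn0 : n = 0
      · subst hn0
        rw [if_neg (by omega)]
        rw [findNewIdsLoop, dif_pos (by simp)]
        exact (PySem.List.sorted_eq_nil_iff _ _ _).mpr rfl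
      · have hn : 0 < n := by omega
        have hx : ∃ x ∈ s, 0 ≤ x := by
          by_contra hcon
          push_neg at hcon
          exact hnd ⟨hn, hs, fun x hx => by have := hcon x hx; omega⟩
        obtain ⟨x, hxs, hx0⟩ := hx
        have hm0 : m = 0 := by have := hub x hxs; omega
        subst hm0
        rw [if_pos hn]
        rw [findNewIdsLoop_all_lt s n.toNat 1 (fun y hy => by have := hub y hy; omega)]
        simp only [List.nil_append, sub_zero, zero_add]
        rw [PySem.List.sorted_eq_self_of_pairwise _ _
          ((PySem.List.pairwise_lt_pyRange_one _ _).imp le_of_lt)]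
        congr 1
        omega

theorem main_ne (n : Int) (s : List Int) (hpre : 0 ≤ n)
    (hD : 0 < n ∧ s ≠ [] ∧ ∀ x ∈ s, x < 0) :
    find_new_ids n s ≠ find_new_ids_alt n s := by
  obtain ⟨hn, hs, hneg⟩ := hD
  unfold find_new_ids find_new_ids_alt
  rw [if_neg hs]
  obtain ⟨m, hm⟩ : ∃ m, PySem.List.max? s (fun x => x) = some m := by
    cases h : PySem.List.max? s (fun x => x) with
    | none => exact absurd ((PySem.List.max?_eq_none_iff s _).mp h) hs
    | some m => exact ⟨m, rfl⟩
  have hmem : m ∈ s := PySem.List.max?_mem hm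
  have hmneg : m < 0 := hneg m hmem
  rw [hm]
  simp only [PySem.List.pyRange_one_eq_nil (by omega : m ≤ 1)]
  simp only [List.filter_nil, PySem.List.slice_to _ hpre, List.take_nil, List.length_nil,
    Nat.cast_zero, sub_zero, List.nil_append]
  rw [if_pos hn]
  rw [PySem.List.sorted_eq_self_of_pairwise _ _
    ((PySem.List.pairwise_lt_pyRange_one _ _).imp le_of_lt)]
  rw [findNewIdsLoop_all_lt s n.toNat 1 (fun x hx => by have := hneg x hx; omega)]
  rw [PySem.List.pyRange_one_cons (by omega : m + 1 < m + 1 + n),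
      PySem.List.pyRange_one_cons (by omega : (1 : Int) < 1 + n.toNat)]
  intro heq
  have := (List.cons.injEq _ _ _ _).mp heq
  omega

-- ===== VERDICT (by name: the statement is the Claim_ definition above) =====
theorem find_new_ids_spec : Claim_unchanged_find_new_ids := by
  intro n s _ hpre
  unfold Spec_find_new_ids
  intro hnd
  unfold D_find_new_ids at hnd
  exact main_eq n s hpre hnd

theorem find_new_ids_changed : Claim_changed_find_new_ids := by
  unfold Claim_changed_find_new_ids
  refine ⟨by decide, by decide, by decide, by decide, ?_, by decide⟩
  show find_new_ids_alt 1 [-3] = [1]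
  unfold find_new_ids_alt
  rw [findNewIdsLoop, dif_neg (by decide), dif_neg (by decide)]
  rw [findNewIdsLoop, dif_pos (by decide)]

theorem find_new_ids_tight : Claim_exact_find_new_ids := by
  intro n s _ hpre hD
  unfold D_find_new_ids at hD
  exact main_ne n s hpre hD
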